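-- pv_equiv track=rewrite | github.com/robl-25/advent_of_code_2023 | day-13/part-1.py | find_mirror
-- ===== SOURCE A (Python) =====
-- def find_mirror(s):
--     mirrors = set()
--
--     for i, _ in enumerate(s):
--         sub = s[i:]
--
--         if sub == sub[::-1] and len(sub) % 2 == 0:
--             mirrors.add(round(i + len(sub) / 2))
--
--     s = s[::-1]
--
--     for i, _ in enumerate(s):
--         sub = s[i:]
--
--         if sub == sub[::-1] and len(sub) % 2 == 0:
--             mirrors.add(round((len(s) - i) / 2))
--
--     return list(mirrors)
-- ===== SOURCE B (Python) =====
-- def find_mirror(s):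
--     # Single pass over split points: m is a mirror iff the shorter side of the
--     # split equals the reflection of the other side. Returns positions ascending.
--     n = len(s)
--     out = []
--     for m in range(1, n):
--         k = m if m <= n - m else n - m
--         if s[m - k:m] == s[m:m + k][::-1]:
--             out.append(m)
--     return out
-- ===== Notes on version B (the rewrite author's own statement) =====
-- stated objective: faster
-- what changed: A scans every suffix of the string and of its reversed copy, building and reversing a whole slice per index and collecting mirror positions into a set; B makes one pass over the n-1 split points and tests each by comparing the shorter side's slice with the reversed other side, returning positions in ascending order.
-- outside the precondition, e.g. on find_mirror('bbbbbbabb'): A returns [8, 1, 2, 3], B returns [1, 2, 3, 8]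
import Mathlib
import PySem

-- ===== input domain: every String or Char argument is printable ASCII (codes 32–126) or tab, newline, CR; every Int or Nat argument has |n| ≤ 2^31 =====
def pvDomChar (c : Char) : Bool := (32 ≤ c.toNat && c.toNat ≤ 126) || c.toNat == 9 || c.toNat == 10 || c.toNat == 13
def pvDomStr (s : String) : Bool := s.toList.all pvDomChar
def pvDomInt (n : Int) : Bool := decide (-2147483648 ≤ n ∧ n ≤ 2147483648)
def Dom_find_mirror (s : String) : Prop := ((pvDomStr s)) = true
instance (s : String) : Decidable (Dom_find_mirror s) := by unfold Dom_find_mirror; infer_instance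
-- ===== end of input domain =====

-- B replaces A's two quadratic suffix/prefix-palindrome scans (each reversing a whole
-- slice per index, collecting into a set) by one pass over the split points that checks
-- the reflection directly; equivalence is claimed on inputs with at most one mirror
-- position, where list(set(...)) iteration order is determined.

-- ===== PORT A =====
-- round(i + len(sub)/2) and round((len(s)-i)/2) are exact integers here because the
-- branch guarantees len(sub) is even; they are ported as Nat division by 2.
def find_mirror (s : String) : List Int :=
  let cs := s.toList
  -- for i, _ in enumerate(s): sub = s[i:] …
  let mirrors : PySem.Set Int :=
    (List.range cs.length).foldl
      (fun ms i =>
        let sub := cs.drop i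
        if sub == sub.reverse && sub.length % 2 == 0 then
          PySem.Set.add ms ((i : Int) + ((sub.length / 2 : Nat) : Int))
        else ms)
      PySem.Set.empty
  -- s = s[::-1]; for i, _ in enumerate(s): sub = s[i:] …
  let cs2 := cs.reverse
  let mirrors2 : PySem.Set Int :=
    (List.range cs2.length).foldl
      (fun ms i =>
        let sub := cs2.drop i
        if sub == sub.reverse && sub.length % 2 == 0 then
          PySem.Set.add ms ((((cs2.length - i) / 2 : Nat) : Int))
        else ms)
      mirrors
  -- return list(mirrors): under Pre_ the set has at most one element, so its
  -- iteration order is determined and the Set's insertion-order list is exact.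
  mirrors2

-- ===== PORT B =====
-- for m in range(1, n): the slices s[m-k:m] and s[m:m+k] are in range (0 ≤ m-k, m+k ≤ n),
-- so they are ported as drop/take
def find_mirror_alt (s : String) : List Int :=
  let cs := s.toList
  let n := cs.length
  (List.range' 1 (n - 1)).foldl
    (fun out m =>
      let k := if m ≤ n - m then m else n - m
      if (cs.drop (m - k)).take k == ((cs.drop m).take k).reverse then
        out ++ [(m : Int)]
      else out)
    []

-- ===== PRECONDITION & SPEC =====
-- spec-level condition: position m is a mirror of cs (the shorter side reflects onto the other)
def pvMirrorB (cs : List Char) (m : Nat) : Bool :=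
  decide (∀ j, j < min m (cs.length - m) → cs.getD (m - 1 - j) ' ' = cs.getD (m + j) ' ')

-- Pre_ excludes strings with two or more mirror positions: there A returns list(set(...)),
-- whose CPython hash-table iteration order is accidental and not a specified order.
def Pre_find_mirror (s : String) : Prop :=
  ((List.range' 1 (s.toList.length - 1)).countP (pvMirrorB s.toList)) ≤ 1
instance (s : String) : Decidable (Pre_find_mirror s) := by unfold Pre_find_mirror; infer_instance

def pvWitness_find_mirror : String := "abba"

def Spec_find_mirror (s : String) (out : List Int) : Prop := out = find_mirror_alt s
instance (s : String) (out : List Int) : Decidable (Spec_find_mirror s out) := by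
  unfold Spec_find_mirror; infer_instance

-- ===== CLAIM (what is proved, stated in full; the proofs are below) =====
def Claim_equal_find_mirror : Prop :=
  ∀ (s : String), Dom_find_mirror s → Pre_find_mirror s → Spec_find_mirror s (find_mirror s)

-- ===== LEMMAS AND PROOFS =====

theorem pv_half_sym {α : Type} (L : Nat) (hL : L % 2 = 0) (g : Nat → α) :
    (∀ j, j < L → g j = g (L - 1 - j)) ↔ (∀ t, t < L / 2 → g (L / 2 - 1 - t) = g (L / 2 + t)) := by
  constructor
  · intro h t ht
    have e : L - 1 - (L / 2 + t) = L / 2 - 1 - t := by omega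
    have := h (L / 2 + t) (by omega)
    rw [e] at this
    exact this.symm
  · intro h j hj
    by_cases hj2 : L / 2 ≤ j
    · have := h (j - L / 2) (by omega)
      have e1 : L / 2 - 1 - (j - L / 2) = L - 1 - j := by omega
      have e2 : L / 2 + (j - L / 2) = j := by omega
      rw [e1, e2] at this
      exact this.symm
    · have := h (L / 2 - 1 - j) (by omega)
      have e1 : L / 2 - 1 - (L / 2 - 1 - j) = j := by omega
      have e2 : L / 2 + (L / 2 - 1 - j) = L - 1 - j := by omega
      rw [e1, e2] at this
      exact this

theorem pv_pal_iff (d : List Char) :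
    d = d.reverse ↔ (∀ j, j < d.length → d.getD j ' ' = d.getD (d.length - 1 - j) ' ') := by
  constructor
  · intro h j hj
    have hj' : j < d.reverse.length := by simpa using hj
    have : d.getD j ' ' = d.reverse.getD j ' ' := by conv_lhs => rw [h]
    rw [List.getD_eq_getElem d ' ' hj, List.getD_eq_getElem _ ' ' hj', List.getElem_reverse] at this
    rw [List.getD_eq_getElem d ' ' hj, List.getD_eq_getElem d ' ' (by omega)]
    exact this
  · intro h
    apply List.ext_getElem (by simp)
    intro i h1 h2
    rw [List.getElem_reverse]
    have := h i h1
    rw [List.getD_eq_getElem d ' ' h1, List.getD_eq_getElem d ' ' (by omega)] at this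
    exact this

theorem pv_getD_drop (cs : List Char) (i j : Nat) (h : j < cs.length - i) :
    (cs.drop i).getD j ' ' = cs.getD (i + j) ' ' := by
  rw [List.getD_eq_getElem _ ' ' (by simpa using h), List.getD_eq_getElem _ ' ' (by omega)]
  simp

theorem pv_getD_take (cs : List Char) (L j : Nat) (hj : j < L) (hL : L ≤ cs.length) :
    (cs.take L).getD j ' ' = cs.getD j ' ' := by
  rw [List.getD_eq_getElem _ ' ' (by simp; omega), List.getD_eq_getElem _ ' ' (by omega)]
  simp

-- suffix palindromes of even length correspond to mirrors m with cs.length - m ≤ m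
theorem pv_suffix_iff (cs : List Char) (i : Nat) (hi : i < cs.length) :
    (cs.drop i = (cs.drop i).reverse ∧ (cs.length - i) % 2 = 0) ↔
      ((cs.length - i) % 2 = 0 ∧ pvMirrorB cs (i + (cs.length - i) / 2) = true) := by
  set n := cs.length with hn
  set L := n - i with hL
  constructor
  · rintro ⟨hpal, hev⟩
    refine ⟨hev, ?_⟩
    rw [pvMirrorB, decide_eq_true_iff]
    intro t ht
    have hmin : min (i + L / 2) (n - (i + L / 2)) = L / 2 := by omega
    rw [hmin] at ht
    have h1 := (pv_pal_iff (cs.drop i)).mp hpal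
    have hlen : (cs.drop i).length = L := by simp [hL, ← hn]
    rw [hlen] at h1
    have h2 : ∀ j, j < L → cs.getD (i + j) ' ' = cs.getD (i + (L - 1 - j)) ' ' := by
      intro j hj
      have := h1 j hj
      rw [pv_getD_drop cs i j (by omega), pv_getD_drop cs i (L - 1 - j) (by omega)] at this
      exact this
    have h3 := (pv_half_sym L hev (fun j => cs.getD (i + j) ' ')).mp (by
      intro j hj; exact h2 j hj)
    have := h3 t ht
    have e1 : i + (L / 2 - 1 - t) = i + L / 2 - 1 - t := by omega
    have e2 : i + (L / 2 + t) = i + L / 2 + t := by omega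
    rw [e1, e2] at this
    exact this
  · rintro ⟨hev, hmir⟩
    refine ⟨?_, hev⟩
    rw [pvMirrorB, decide_eq_true_iff] at hmir
    have hmin : min (i + L / 2) (n - (i + L / 2)) = L / 2 := by omega
    rw [hmin] at hmir
    rw [pv_pal_iff]
    have hlen : (cs.drop i).length = L := by simp [hL, ← hn]
    rw [hlen]
    intro j hj
    rw [pv_getD_drop cs i j (by omega), pv_getD_drop cs i (L - 1 - j) (by omega)]
    refine (pv_half_sym L hev (fun j => cs.getD (i + j) ' ')).mpr ?_ j hj
    intro t ht
    have := hmir t ht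
    have e1 : i + (L / 2 - 1 - t) = i + L / 2 - 1 - t := by omega
    have e2 : i + (L / 2 + t) = i + L / 2 + t := by omega
    rw [e1, e2]
    exact this

-- prefix palindromes of even length (suffixes of the reversed string) correspond to mirrors m ≤ cs.length - m
theorem pv_prefix_iff (cs : List Char) (i : Nat) (hi : i < cs.length) :
    (cs.reverse.drop i = (cs.reverse.drop i).reverse ∧ (cs.length - i) % 2 = 0) ↔
      ((cs.length - i) % 2 = 0 ∧ pvMirrorB cs ((cs.length - i) / 2) = true) := by
  set n := cs.length with hn
  set L := n - i with hL
  have hdr : cs.reverse.drop i = (cs.take L).reverse := by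
    rw [List.reverse_take]; congr 1; omega
  have hpal : (cs.reverse.drop i = (cs.reverse.drop i).reverse) ↔ (cs.take L = (cs.take L).reverse) := by
    rw [hdr, List.reverse_reverse]
    exact eq_comm
  rw [hpal]
  constructor
  · rintro ⟨hp, hev⟩
    refine ⟨hev, ?_⟩
    rw [pvMirrorB, decide_eq_true_iff]
    intro t ht
    have hmin : min (L / 2) (n - L / 2) = L / 2 := by omega
    rw [hmin] at ht
    have h1 := (pv_pal_iff (cs.take L)).mp hp
    have hlen : (cs.take L).length = L := by simp [hL, ← hn]
    rw [hlen] at h1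
    have h2 : ∀ j, j < L → cs.getD j ' ' = cs.getD (L - 1 - j) ' ' := by
      intro j hj
      have := h1 j hj
      rw [pv_getD_take cs L j hj (by omega), pv_getD_take cs L (L - 1 - j) (by omega) (by omega)] at this
      exact this
    exact (pv_half_sym L hev (fun j => cs.getD j ' ')).mp h2 t ht
  · rintro ⟨hev, hmir⟩
    refine ⟨?_, hev⟩
    rw [pvMirrorB, decide_eq_true_iff] at hmir
    have hmin : min (L / 2) (n - L / 2) = L / 2 := by omega
    rw [hmin] at hmir
    rw [pv_pal_iff]
    have hlen : (cs.take L).length = L := by simp [hL, ← hn]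
    rw [hlen]
    intro j hj
    rw [pv_getD_take cs L j hj (by omega), pv_getD_take cs L (L - 1 - j) (by omega) (by omega)]
    exact (pv_half_sym L hev (fun j => cs.getD j ' ')).mpr hmir j hj

theorem pv_nodup_foldl_add {α β : Type} [BEq α] [LawfulBEq α] (l : List β) (f : β → α)
    (s : List α) (hs : s.Nodup) :
    (l.foldl (fun s b => PySem.Set.add s (f b)) s).Nodup := by
  induction l generalizing s with
  | nil => exact hs
  | cons x xs ih =>
    simp only [List.foldl_cons]
    exact ih _ (PySem.Set.nodup_add _ _ hs)

-- membership in A's result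
theorem pv_A_mem (s : String) (x : Int) :
    x ∈ find_mirror s ↔
      ∃ m, 1 ≤ m ∧ m < s.toList.length ∧ pvMirrorB s.toList m = true ∧ x = (m : Int) := by
  unfold find_mirror
  dsimp only
  rw [PySem.List.foldl_if_eq_foldl_filter, PySem.List.foldl_if_eq_foldl_filter,
      PySem.Set.mem_foldl_add, PySem.Set.mem_foldl_add]
  simp only [PySem.Set.empty, List.not_mem_nil, false_or, List.mem_filter, List.mem_range,
    Bool.and_eq_true, beq_iff_eq, List.length_reverse, List.length_drop]
  set cs := s.toList with hcs
  constructor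
  · rintro (⟨i, ⟨hi, hpal, hev⟩, hx⟩ | ⟨i, ⟨hi, hpal, hev⟩, hx⟩)
    · -- first loop: suffix palindrome at index i, mirror m = i + (n-i)/2
      have h := (pv_suffix_iff cs i hi).mp ⟨hpal, hev⟩
      refine ⟨i + (cs.length - i) / 2, by omega, by omega, h.2, ?_⟩
      rw [hx]
      have e : ((i + (cs.length - i) / 2 : Nat) : Int)
          = (i : Int) + (((cs.length - i) / 2 : Nat) : Int) := by push_cast; ring
      rw [e]
    · -- second loop: prefix palindrome (suffix of the reversed string), mirror m = (n-i)/2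
      have h := (pv_prefix_iff cs i hi).mp ⟨hpal, hev⟩
      exact ⟨(cs.length - i) / 2, by omega, by omega, h.2, hx⟩
  · rintro ⟨m, hm1, hmn, hmir, hx⟩
    by_cases hc : cs.length - m ≤ m
    · -- suffix mirror: comes from the first loop with i = 2m - n
      left
      have e : (2 * m - cs.length) + (cs.length - (2 * m - cs.length)) / 2 = m := by omega
      have h := (pv_suffix_iff cs (2 * m - cs.length) (by omega)).mpr
        ⟨by omega, by rw [e]; exact hmir⟩
      refine ⟨2 * m - cs.length, ⟨by omega, h.1, by omega⟩, ?_⟩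
      have e2 : (cs.length - (2 * m - cs.length)) / 2 = cs.length - m := by omega
      rw [hx, e2]
      have e3 : ((m : Nat) : Int)
          = ((2 * m - cs.length : Nat) : Int) + ((cs.length - m : Nat) : Int) := by
        push_cast [Nat.cast_sub (by omega : cs.length ≤ 2 * m),
          Nat.cast_sub (by omega : m ≤ cs.length)]
        ring
      rw [e3]
    · -- prefix mirror: comes from the second loop with i = n - 2m
      right
      have e : (cs.length - (cs.length - 2 * m)) / 2 = m := by omega
      have h := (pv_prefix_iff cs (cs.length - 2 * m) (by omega)).mpr
        ⟨by omega, by rw [e]; exact hmir⟩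
      refine ⟨cs.length - 2 * m, ⟨by omega, h.1, by omega⟩, by rw [hx, e]⟩

theorem pv_A_nodup (s : String) : (find_mirror s).Nodup := by
  unfold find_mirror
  dsimp only
  rw [PySem.List.foldl_if_eq_foldl_filter, PySem.List.foldl_if_eq_foldl_filter]
  exact pv_nodup_foldl_add (α := Int) _ _ _ (pv_nodup_foldl_add (α := Int) _ _ _ List.nodup_nil)

theorem pv_getD_slice (cs : List Char) (a b j : Nat) (hj : j < b) (h : a + b ≤ cs.length) :
    ((cs.drop a).take b).getD j ' ' = cs.getD (a + j) ' ' := by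
  rw [List.getD_eq_getElem _ ' ' (by simp; omega), List.getD_eq_getElem _ ' ' (by omega)]
  simp

theorem pv_getD_slice_rev (cs : List Char) (m k j : Nat) (hj : j < k) (h : m + k ≤ cs.length) :
    (((cs.drop m).take k).reverse).getD j ' ' = cs.getD (m + (k - 1 - j)) ' ' := by
  have hl : ((cs.drop m).take k).length = k := by simp; omega
  rw [List.getD_eq_getElem _ ' ' (by simp; omega), List.getD_eq_getElem _ ' ' (by omega),
      List.getElem_reverse]
  simp only [List.getElem_take, List.getElem_drop, hl]

-- the slice test of B is exactly the pointwise mirror condition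
theorem pv_slice_rev_iff (cs : List Char) (m k : Nat) (hkm : k ≤ m) (hkn : m + k ≤ cs.length) :
    ((cs.drop (m - k)).take k = ((cs.drop m).take k).reverse) ↔
      (∀ j, j < k → cs.getD (m - 1 - j) ' ' = cs.getD (m + j) ' ') := by
  have hl1 : ((cs.drop (m - k)).take k).length = k := by simp; omega
  have hl2 : ((cs.drop m).take k).length = k := by simp; omega
  constructor
  · intro h j hj
    have e := congrArg (fun l => l.getD (k - 1 - j) ' ') h
    simp only at e
    rw [pv_getD_slice cs (m - k) k (k - 1 - j) (by omega) (by omega),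
        pv_getD_slice_rev cs m k (k - 1 - j) (by omega) (by omega)] at e
    have e1 : m - k + (k - 1 - j) = m - 1 - j := by omega
    have e2 : m + (k - 1 - (k - 1 - j)) = m + j := by omega
    rw [e1, e2] at e
    exact e
  · intro h
    apply List.ext_getElem (by rw [hl1, List.length_reverse, hl2])
    intro i hi1 hi2
    rw [hl1] at hi1
    rw [← List.getD_eq_getElem _ ' ' (by rw [hl1]; exact hi1),
        ← List.getD_eq_getElem _ ' ' hi2,
        pv_getD_slice cs (m - k) k i hi1 (by omega),
        pv_getD_slice_rev cs m k i hi1 (by omega)]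
    have := h (k - 1 - i) (by omega)
    have e1 : m - 1 - (k - 1 - i) = m - k + i := by omega
    rw [e1] at this
    exact this

-- B's result is the ascending list of mirror positions
theorem pv_B_eq (s : String) :
    find_mirror_alt s =
      ((List.range' 1 (s.toList.length - 1)).filter (pvMirrorB s.toList)).map Int.ofNat := by
  unfold find_mirror_alt
  dsimp only
  set cs := s.toList with hcs
  rw [PySem.List.foldl_append_if]
  rw [List.nil_append]
  refine congrArg (List.map _) (List.filter_congr ?_)
  intro m hm
  obtain ⟨h1m, hmn⟩ : 1 ≤ m ∧ m < cs.length := by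
    rcases List.mem_range'.mp hm with ⟨i, hi, rfl⟩
    omega
  rw [pvMirrorB, Nat.min_def, Bool.eq_iff_iff, beq_iff_eq, decide_eq_true_iff]
  by_cases hc : m ≤ cs.length - m
  · rw [if_pos hc]
    exact pv_slice_rev_iff cs m m (le_refl m) (by omega)
  · rw [if_neg hc]
    exact pv_slice_rev_iff cs m (cs.length - m) (by omega) (by omega)

theorem pv_singleton_of_nodup {α : Type} (l : List α) (a : α) (hn : l.Nodup)
    (h : ∀ x, x ∈ l ↔ x = a) : l = [a] := by
  match l with
  | [] => exact absurd ((h a).mpr rfl) (List.not_mem_nil)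
  | [x] => rw [(h x).mp (List.mem_singleton_self x)]
  | x :: y :: t =>
    have hx : x = a := (h x).mp (by simp)
    have hy : y = a := (h y).mp (by simp)
    rw [hx, hy] at hn
    simp at hn

-- ===== VERDICT (by name: the statement is the Claim_ definition above) =====
theorem find_mirror_spec : Claim_equal_find_mirror := by
  intro s _ hpre
  unfold Spec_find_mirror
  rw [pv_B_eq]
  have hlen : ((List.range' 1 (s.toList.length - 1)).filter (pvMirrorB s.toList)).length ≤ 1 := by
    rw [← List.countP_eq_length_filter]
    exact hpre
  have hmemF : ∀ m, m ∈ (List.range' 1 (s.toList.length - 1)).filter (pvMirrorB s.toList) ↔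
      (1 ≤ m ∧ m < s.toList.length ∧ pvMirrorB s.toList m = true) := by
    intro m
    rw [List.mem_filter, List.mem_range']
    constructor
    · rintro ⟨⟨i, hi, rfl⟩, h2⟩; exact ⟨by omega, by omega, h2⟩
    · rintro ⟨h1, h2, h3⟩; exact ⟨⟨m - 1, by omega, by omega⟩, h3⟩
  rcases hFe : (List.range' 1 (s.toList.length - 1)).filter (pvMirrorB s.toList) with _ | ⟨m₀, rest⟩
  · rw [hFe] at hmemF
    rw [List.map_nil, List.eq_nil_iff_forall_not_mem]
    intro x hx
    obtain ⟨m, h1, h2, h3, _⟩ := (pv_A_mem s x).mp hx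
    exact List.not_mem_nil ((hmemF m).mpr ⟨h1, h2, h3⟩)
  · rw [hFe] at hmemF hlen
    have hr : rest = [] := by
      cases rest with
      | nil => rfl
      | cons y t => simp at hlen
    subst hr
    rw [List.map_cons, List.map_nil]
    have hm₀ := (hmemF m₀).mp (by simp)
    apply pv_singleton_of_nodup _ _ (pv_A_nodup s)
    intro x
    rw [pv_A_mem]
    constructor
    · rintro ⟨m, h1, h2, h3, rfl⟩
      have hm : m = m₀ := by
        have := (hmemF m).mpr ⟨h1, h2, h3⟩
        simpa using this
      rw [hm]
      rfl
    · rintro rfl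
      exact ⟨m₀, hm₀.1, hm₀.2.1, hm₀.2.2, rfl⟩
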